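-- pv_equiv track=rewrite | github.com/ScrollPrize/villa | lasagna/lasagna3d/dataset_overlap.py | _groups_from_pairs
-- ===== SOURCE A (Python) =====
-- def _groups_from_pairs(n: int, pairs: list[tuple[int, int]]) -> list[list[int]]:
--     """Union-find: build groups of original slot indices from merge pairs.
--
--     Every slot in [0, n) is included, singletons for slots that don't
--     appear in any pair. Groups are returned in order of first
--     occurrence of their representative.
--     """
--     parent = list(range(n))
--
--     def find(a: int) -> int:
--         while parent[a] != a:
--             parent[a] = parent[parent[a]]
--             a = parent[a]
--         return a
--
--     def union(a: int, b: int) -> None: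
--         ra, rb = find(a), find(b)
--         if ra != rb:
--             parent[max(ra, rb)] = min(ra, rb)
--
--     for a, b in pairs:
--         if 0 <= a < n and 0 <= b < n:
--             union(a, b)
--
--     groups_by_root: dict[int, list[int]] = {}
--     for i in range(n):
--         r = find(i)
--         groups_by_root.setdefault(r, []).append(i)
--     ordered_roots = sorted(groups_by_root.keys())
--     return [sorted(groups_by_root[r]) for r in ordered_roots]
-- ===== SOURCE B (Python) =====
-- def _groups_from_pairs(n: int, pairs: list[tuple[int, int]]) -> list[list[int]]:
--     """Merge-by-relabel: keep a label per slot and explicit member lists per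
--     component; merging relabels the higher-labelled component's members."""
--     lbl = list(range(n))
--     members = {i: [i] for i in range(n)}
--     for a, b in pairs:
--         if 0 <= a < n and 0 <= b < n:
--             la, lb = lbl[a], lbl[b]
--             if la != lb:
--                 lo, hi = min(la, lb), max(la, lb)
--                 ms = members.pop(hi)
--                 for x in ms:
--                     lbl[x] = lo
--                 members[lo].extend(ms)
--     return [sorted(members[r]) for r in sorted(members)]
-- ===== Notes on version B (the rewrite author's own statement) =====
-- stated objective: alternative
-- what changed: Replaces the union-find parent array (find with path halving, union by min root, then a dict-grouping pass over all slots) by a direct merge-by-relabel scheme: a label per slot plus an explicit member list per component; a merge relabels only the higher-labelled component's members and concatenates the member lists, so no find/union and no final grouping scan over roots is needed.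
import Mathlib
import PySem

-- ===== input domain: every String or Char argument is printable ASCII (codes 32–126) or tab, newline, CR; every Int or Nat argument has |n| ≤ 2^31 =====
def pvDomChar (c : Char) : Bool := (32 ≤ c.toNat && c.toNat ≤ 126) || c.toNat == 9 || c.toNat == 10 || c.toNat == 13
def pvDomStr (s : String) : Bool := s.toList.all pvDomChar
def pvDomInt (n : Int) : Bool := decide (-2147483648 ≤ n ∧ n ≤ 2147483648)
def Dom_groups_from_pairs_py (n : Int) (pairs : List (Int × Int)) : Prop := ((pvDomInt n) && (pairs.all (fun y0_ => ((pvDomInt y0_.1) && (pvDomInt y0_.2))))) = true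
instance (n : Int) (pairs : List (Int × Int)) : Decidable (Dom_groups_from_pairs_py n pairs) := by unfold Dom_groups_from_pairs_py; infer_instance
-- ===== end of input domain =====

-- B replaces A's union-find (find with path halving + union by min root + a final
-- grouping pass keyed by find) with a merge-by-relabel scheme: a label per slot and an
-- explicit member list per component; same return value, a different data structure.

-- ===== PORT A =====
-- parent[a] (indices are provably in range at every use; the total pyGetD/pySetD forms realise the in-range access)
def pvGet (p : List Int) (i : Int) : Int := PySem.List.pyGetD p i 0

-- 'while parent[a] != a: parent[a] = parent[parent[a]]; a = parent[a]'.  The fuel only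
-- totalises the while-loop: the parent array always satisfies parent[x] ≤ x, so 'a'
-- strictly decreases each iteration and a.toNat + 1 steps always suffice.
def pvFindLoop : List Int → Int → Nat → List Int × Int
  | p, a, 0 => (p, a)
  | p, a, f+1 =>
    if pvGet p a = a then (p, a)
    else
      let p' := PySem.List.pySetD p a (pvGet p (pvGet p a))
      pvFindLoop p' (pvGet p' a) f

def pvFind (p : List Int) (a : Int) : List Int × Int := pvFindLoop p a (a.toNat + 1)

def pvUnion (p : List Int) (a b : Int) : List Int :=
  let fa := pvFind p a
  let fb := pvFind fa.1 b
  if fa.2 ≠ fb.2 then PySem.List.pySetD fb.1 (max fa.2 fb.2) (min fa.2 fb.2) else fb.1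

def groups_from_pairs_py (n : Int) (pairs : List (Int × Int)) : List (List Int) :=
  let parent0 : List Int := (List.range n.toNat).map (fun (i : Nat) => (i : Int))
  let parent := pairs.foldl
    (fun p ab => if 0 ≤ ab.1 ∧ ab.1 < n ∧ 0 ≤ ab.2 ∧ ab.2 < n then pvUnion p ab.1 ab.2 else p)
    parent0
  -- for i in range(n): r = find(i); groups_by_root.setdefault(r, []).append(i)
  let st := (List.range n.toNat).foldl
    (fun (s : List Int × PySem.Dict Int (List Int)) (i : Nat) =>
      let fr := pvFind s.1 (i : Int)
      (fr.1, s.2.modify fr.2 [] (fun g => g ++ [(i : Int)])))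
    (parent, PySem.Dict.empty)
  (PySem.List.sorted st.2.keys (fun r => r) false).map
    (fun r => PySem.List.sorted (st.2.getD r []) (fun x => x) false)

-- ===== PORT B =====
-- 'for x in ms: lbl[x] = lo'
def pvRelabel (lbl : List Int) (ms : List Int) (lo : Int) : List Int :=
  ms.foldl (fun l x => PySem.List.pySetD l x lo) lbl

def groups_from_pairs_py_alt (n : Int) (pairs : List (Int × Int)) : List (List Int) :=
  let lbl0 : List Int := (List.range n.toNat).map (fun (i : Nat) => (i : Int))
  let members0 := (List.range n.toNat).foldl
    (fun (d : PySem.Dict Int (List Int)) (i : Nat) => d.insert (i : Int) [(i : Int)]) PySem.Dict.empty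
  let st := pairs.foldl
    (fun (s : List Int × PySem.Dict Int (List Int)) ab =>
      if 0 ≤ ab.1 ∧ ab.1 < n ∧ 0 ≤ ab.2 ∧ ab.2 < n then
        let la := pvGet s.1 ab.1
        let lb := pvGet s.1 ab.2
        if la ≠ lb then
          let lo := min la lb
          let hi := max la lb
          let ms := s.2.getD hi []                              -- ms = members.pop(hi)
          (pvRelabel s.1 ms lo, (s.2.erase hi).modify lo [] (fun g => g ++ ms))
        else s
      else s)
    (lbl0, members0)
  (PySem.List.sorted st.2.keys (fun r => r) false).map
    (fun r => PySem.List.sorted (st.2.getD r []) (fun x => x) false)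

-- ===== PRECONDITION & SPEC =====
def Spec_groups_from_pairs_py (n : Int) (pairs : List (Int × Int)) (out : List (List Int)) : Prop := out = groups_from_pairs_py_alt n pairs
instance (n : Int) (pairs : List (Int × Int)) (out : List (List Int)) : Decidable (Spec_groups_from_pairs_py n pairs out) := by unfold Spec_groups_from_pairs_py; infer_instance

-- ===== CLAIM (what is proved, stated in full; the proofs are below) =====
def Claim_equal_groups_from_pairs_py : Prop := ∀ (n : Int) (pairs : List (Int × Int)), Dom_groups_from_pairs_py n pairs → Spec_groups_from_pairs_py n pairs (groups_from_pairs_py n pairs)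

-- ===== LEMMAS AND PROOFS =====
theorem pvSet_eq (p : List Int) (b v : Int) (h0 : 0 ≤ b) (h1 : b < (p.length : Int)) :
    PySem.List.pySetD p b v = p.set b.toNat v := by
  simp [PySem.List.pySetD, PySem.List.pySet?, PySem.List.pyIdx?, h0, h1]

theorem pvSet_length (p : List Int) (b v : Int) :
    (PySem.List.pySetD p b v).length = p.length := by
  simp [PySem.List.pySetD, PySem.List.pySet?, PySem.List.pyIdx?]
  split_ifs <;> simp

theorem pvGet_set (p : List Int) (b v a : Int) (h0 : 0 ≤ b) (h1 : b < (p.length : Int))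
    (ha : 0 ≤ a) (ha2 : a < (p.length : Int)) :
    pvGet (PySem.List.pySetD p b v) a = if a = b then v else pvGet p a := by
  rw [pvSet_eq p b v h0 h1]
  unfold pvGet
  rw [PySem.List.pyGetD_eq_getElem _ _ ha (by simpa using ha2),
      PySem.List.pyGetD_eq_getElem _ _ ha ha2]
  rw [List.getElem_set]
  have : b.toNat = a.toNat ↔ a = b := by omega
  simp only [this]

def rootF (p : List Int) : Int → Nat → Int
  | a, 0 => a
  | a, f+1 => if pvGet p a = a then a else rootF p (pvGet p a) f

def Root (p : List Int) (a : Int) : Int := rootF p a (a.toNat + 1)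

def pvInv (p : List Int) (n' : Nat) : Prop :=
  p.length = n' ∧ ∀ a : Int, 0 ≤ a → a < (n' : Int) → 0 ≤ pvGet p a ∧ pvGet p a ≤ a

theorem rootF_congr (p : List Int) (n' : Nat) (h : pvInv p n') :
    ∀ k, ∀ (a : Int) (f g : Nat), a.toNat ≤ k → 0 ≤ a → a < (n' : Int) →
      a.toNat < f → a.toNat < g → rootF p a f = rootF p a g := by
  intro k
  induction k with
  | zero =>
    intro a f g hk ha0 han hf hg
    obtain ⟨f', rfl⟩ : ∃ f', f = f' + 1 := ⟨f - 1, by omega⟩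
    obtain ⟨g', rfl⟩ : ∃ g', g = g' + 1 := ⟨g - 1, by omega⟩
    have ha : a = 0 := by omega
    subst ha
    have := (h.2 0 le_rfl (by omega))
    have : pvGet p 0 = 0 := by omega
    simp [rootF, this]
  | succ k ih =>
    intro a f g hk ha0 han hf hg
    obtain ⟨f', rfl⟩ : ∃ f', f = f' + 1 := ⟨f - 1, by omega⟩
    obtain ⟨g', rfl⟩ : ∃ g', g = g' + 1 := ⟨g - 1, by omega⟩
    by_cases hfix : pvGet p a = a
    · simp [rootF, hfix]
    · have hb := h.2 a ha0 han
      have hlt : pvGet p a < a := lt_of_le_of_ne hb.2 hfix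
      simp only [rootF, hfix, if_false]
      exact ih (pvGet p a) f' g' (by omega) hb.1 (by omega) (by omega) (by omega)

theorem rootF_eq_Root (p : List Int) (n' : Nat) (h : pvInv p n') (a : Int) (f : Nat)
    (ha0 : 0 ≤ a) (han : a < (n' : Int)) (hf : a.toNat < f) : rootF p a f = Root p a :=
  rootF_congr p n' h a.toNat a f (a.toNat + 1) le_rfl ha0 han hf (by omega)

theorem Root_step (p : List Int) (n' : Nat) (h : pvInv p n') (a : Int)
    (ha0 : 0 ≤ a) (han : a < (n' : Int)) (hfix : pvGet p a ≠ a) :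
    Root p a = Root p (pvGet p a) := by
  have hb := h.2 a ha0 han
  have hlt : pvGet p a < a := lt_of_le_of_ne hb.2 hfix
  show rootF p a (a.toNat + 1) = _
  simp only [rootF, hfix, if_false]
  exact rootF_eq_Root p n' h (pvGet p a) a.toNat hb.1 (by omega) (by omega)

theorem Root_fix (p : List Int) (n' : Nat) (h : pvInv p n') (a : Int)
    (ha0 : 0 ≤ a) (han : a < (n' : Int)) (hfix : pvGet p a = a) : Root p a = a := by
  show rootF p a (a.toNat + 1) = a
  simp [rootF, hfix]

theorem Root_spec (p : List Int) (n' : Nat) (h : pvInv p n') :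
    ∀ k (a : Int), a.toNat ≤ k → 0 ≤ a → a < (n' : Int) →
      0 ≤ Root p a ∧ Root p a ≤ a ∧ pvGet p (Root p a) = Root p a := by
  intro k
  induction k with
  | zero =>
    intro a hk ha0 han
    have ha : a = 0 := by omega
    subst ha
    have h0 := h.2 0 le_rfl (by omega)
    have hfix : pvGet p 0 = 0 := by omega
    rw [Root_fix p n' h 0 le_rfl (by omega) hfix]
    exact ⟨le_rfl, le_rfl, hfix⟩
  | succ k ih =>
    intro a hk ha0 han
    by_cases hfix : pvGet p a = a
    · rw [Root_fix p n' h a ha0 han hfix]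
      exact ⟨ha0, le_rfl, hfix⟩
    · have hb := h.2 a ha0 han
      have hlt : pvGet p a < a := lt_of_le_of_ne hb.2 hfix
      rw [Root_step p n' h a ha0 han hfix]
      have := ih (pvGet p a) (by omega) hb.1 (by omega)
      exact ⟨this.1, le_trans this.2.1 hb.2, this.2.2⟩

theorem Root_bounds (p : List Int) (n' : Nat) (h : pvInv p n') (a : Int)
    (ha0 : 0 ≤ a) (han : a < (n' : Int)) :
    0 ≤ Root p a ∧ Root p a ≤ a ∧ pvGet p (Root p a) = Root p a :=
  Root_spec p n' h a.toNat a le_rfl ha0 han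

theorem pvInv_set (p : List Int) (n' : Nat) (h : pvInv p n') (b v : Int)
    (hb0 : 0 ≤ b) (hbn : b < (n' : Int)) (hv0 : 0 ≤ v) (hvb : v ≤ b) :
    pvInv (PySem.List.pySetD p b v) n' := by
  have hlen : b < (p.length : Int) := by rw [h.1]; exact hbn
  refine ⟨by rw [pvSet_length, h.1], ?_⟩
  intro a ha0 han
  rw [pvGet_set p b v a hb0 hlen ha0 (by rw [h.1]; exact han)]
  split_ifs with he
  · subst he; exact ⟨hv0, hvb⟩
  · exact h.2 a ha0 han

-- replacing parent[b] by an element v (< b) of b's class keeps every root unchanged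
theorem Root_set_ancestor (p : List Int) (n' : Nat) (h : pvInv p n') (b v : Int)
    (hb0 : 0 ≤ b) (hbn : b < (n' : Int)) (hv0 : 0 ≤ v) (hvb : v < b)
    (hroot : Root p v = Root p b) :
    ∀ k (a : Int), a.toNat ≤ k → 0 ≤ a → a < (n' : Int) →
      Root (PySem.List.pySetD p b v) a = Root p a := by
  have hlen : b < (p.length : Int) := by rw [h.1]; exact hbn
  have h' : pvInv (PySem.List.pySetD p b v) n' := pvInv_set p n' h b v hb0 hbn hv0 (by omega)
  have hget : ∀ a : Int, 0 ≤ a → a < (n' : Int) →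
      pvGet (PySem.List.pySetD p b v) a = if a = b then v else pvGet p a := by
    intro a ha0 han
    exact pvGet_set p b v a hb0 hlen ha0 (by rw [h.1]; exact han)
  intro k
  induction k with
  | zero =>
    intro a hk ha0 han
    have ha : a = 0 := by omega
    subst ha
    have hb' : (0:Int) ≠ b := by omega
    have hfix : pvGet p 0 = 0 := by have := h.2 0 le_rfl (by omega); omega
    have hfix' : pvGet (PySem.List.pySetD p b v) 0 = 0 := by
      rw [hget 0 le_rfl (by omega), if_neg hb']; exact hfix
    rw [Root_fix _ n' h' 0 le_rfl (by omega) hfix', Root_fix _ n' h 0 le_rfl (by omega) hfix]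
  | succ k ih =>
    intro a hk ha0 han
    by_cases hab : a = b
    · subst hab
      have hg : pvGet (PySem.List.pySetD p a v) a = v := by
        rw [hget a ha0 han, if_pos rfl]
      have hfix' : pvGet (PySem.List.pySetD p a v) a ≠ a := by omega
      rw [Root_step _ n' h' a ha0 han hfix', hg]
      rw [ih v (by omega) hv0 (by omega)]
      exact hroot
    · by_cases hfix : pvGet p a = a
      · have hfix' : pvGet (PySem.List.pySetD p b v) a = a := by
          rw [hget a ha0 han, if_neg hab]; exact hfix
        rw [Root_fix _ n' h' a ha0 han hfix', Root_fix _ n' h a ha0 han hfix]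
      · have hb2 := h.2 a ha0 han
        have hlt : pvGet p a < a := lt_of_le_of_ne hb2.2 hfix
        have hg : pvGet (PySem.List.pySetD p b v) a = pvGet p a := by
          rw [hget a ha0 han, if_neg hab]
        have hfix' : pvGet (PySem.List.pySetD p b v) a ≠ a := by omega
        rw [Root_step _ n' h' a ha0 han hfix', hg,
            Root_step _ n' h a ha0 han hfix]
        exact ih (pvGet p a) (by omega) hb2.1 (by omega)

-- pointing root hi at root lo merges the two classes
theorem Root_set_root (p : List Int) (n' : Nat) (h : pvInv p n') (lo hi : Int)
    (hlo0 : 0 ≤ lo) (hlohi : lo < hi) (hhin : hi < (n' : Int))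
    (hloR : pvGet p lo = lo) (hhiR : pvGet p hi = hi) :
    ∀ k (a : Int), a.toNat ≤ k → 0 ≤ a → a < (n' : Int) →
      Root (PySem.List.pySetD p hi lo) a = if Root p a = hi then lo else Root p a := by
  have hlen : hi < (p.length : Int) := by rw [h.1]; exact hhin
  have h' : pvInv (PySem.List.pySetD p hi lo) n' :=
    pvInv_set p n' h hi lo (by omega) hhin hlo0 (by omega)
  have hget : ∀ a : Int, 0 ≤ a → a < (n' : Int) →
      pvGet (PySem.List.pySetD p hi lo) a = if a = hi then lo else pvGet p a := by
    intro a ha0 han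
    exact pvGet_set p hi lo a (by omega) hlen ha0 (by rw [h.1]; exact han)
  have hRlo : Root p lo = lo := Root_fix p n' h lo hlo0 (by omega) hloR
  have hRhi : Root p hi = hi := Root_fix p n' h hi (by omega) hhin hhiR
  intro k
  induction k with
  | zero =>
    intro a hk ha0 han
    have ha : a = 0 := by omega
    subst ha
    have hfix : pvGet p 0 = 0 := by have := h.2 0 le_rfl (by omega); omega
    have h0hi : (0:Int) ≠ hi := by omega
    have hfix' : pvGet (PySem.List.pySetD p hi lo) 0 = 0 := by
      rw [hget 0 le_rfl (by omega), if_neg h0hi]; exact hfix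
    rw [Root_fix _ n' h' 0 le_rfl (by omega) hfix', Root_fix _ n' h 0 le_rfl (by omega) hfix]
    rw [if_neg (by omega : ¬ (0:Int) = hi)]
  | succ k ih =>
    intro a hk ha0 han
    by_cases hab : a = hi
    · subst hab
      have hg : pvGet (PySem.List.pySetD p a lo) a = lo := by
        rw [hget a ha0 han, if_pos rfl]
      have hfix' : pvGet (PySem.List.pySetD p a lo) a ≠ a := by omega
      rw [Root_step _ n' h' a ha0 han hfix', hg]
      rw [ih lo (by omega) hlo0 (by omega)]
      rw [hRlo, if_neg (by omega : ¬ lo = a), hRhi, if_pos rfl]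
    · by_cases hfix : pvGet p a = a
      · have hfix' : pvGet (PySem.List.pySetD p hi lo) a = a := by
          rw [hget a ha0 han, if_neg hab]; exact hfix
        rw [Root_fix _ n' h' a ha0 han hfix', Root_fix _ n' h a ha0 han hfix,
            if_neg hab]
      · have hb2 := h.2 a ha0 han
        have hlt : pvGet p a < a := lt_of_le_of_ne hb2.2 hfix
        have hg : pvGet (PySem.List.pySetD p hi lo) a = pvGet p a := by
          rw [hget a ha0 han, if_neg hab]
        have hfix' : pvGet (PySem.List.pySetD p hi lo) a ≠ a := by omega
        rw [Root_step _ n' h' a ha0 han hfix', hg,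
            Root_step _ n' h a ha0 han hfix]
        exact ih (pvGet p a) (by omega) hb2.1 (by omega)

theorem Root_get (p : List Int) (n' : Nat) (h : pvInv p n') (a : Int)
    (ha0 : 0 ≤ a) (han : a < (n' : Int)) : Root p (pvGet p a) = Root p a := by
  by_cases hfix : pvGet p a = a
  · rw [hfix]
  · exact (Root_step p n' h a ha0 han hfix).symm

theorem Root_idem (p : List Int) (n' : Nat) (h : pvInv p n') (a : Int)
    (ha0 : 0 ≤ a) (han : a < (n' : Int)) : Root p (Root p a) = Root p a := by
  have hb := Root_bounds p n' h a ha0 han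
  exact Root_fix p n' h (Root p a) hb.1 (by omega) hb.2.2

theorem find_spec (n' : Nat) :
    ∀ (f : Nat) (p : List Int) (a : Int), pvInv p n' → 0 ≤ a → a < (n' : Int) → a.toNat < f →
      (pvFindLoop p a f).2 = Root p a ∧ pvInv (pvFindLoop p a f).1 n' ∧
      (∀ x : Int, 0 ≤ x → x < (n' : Int) → Root (pvFindLoop p a f).1 x = Root p x) := by
  intro f
  induction f with
  | zero => intro p a h ha0 han hf; omega
  | succ f ih =>
    intro p a h ha0 han hf
    by_cases hfix : pvGet p a = a
    · simp only [pvFindLoop, hfix, if_pos rfl]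
      exact ⟨(Root_fix p n' h a ha0 han hfix).symm, h, fun x _ _ => rfl⟩
    · have hb := h.2 a ha0 han
      have hlt : pvGet p a < a := lt_of_le_of_ne hb.2 hfix
      have hb2 := h.2 (pvGet p a) hb.1 (by omega)
      have hlena : a < (p.length : Int) := by rw [h.1]; exact han
      have hget : pvGet (PySem.List.pySetD p a (pvGet p (pvGet p a))) a
          = pvGet p (pvGet p a) := by
        rw [pvGet_set p a _ a ha0 hlena ha0 hlena, if_pos rfl]
      have hunf : pvFindLoop p a (f + 1)
          = pvFindLoop (PySem.List.pySetD p a (pvGet p (pvGet p a))) (pvGet p (pvGet p a)) f := by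
        simp only [pvFindLoop, hfix, if_neg hfix, hget, if_false]
      have hroot : Root p (pvGet p (pvGet p a)) = Root p a := by
        rw [Root_get p n' h (pvGet p a) hb.1 (by omega), Root_get p n' h a ha0 han]
      have hinv' : pvInv (PySem.List.pySetD p a (pvGet p (pvGet p a))) n' :=
        pvInv_set p n' h a _ ha0 han hb2.1 (by omega)
      have hrs : ∀ x : Int, 0 ≤ x → x < (n' : Int) →
          Root (PySem.List.pySetD p a (pvGet p (pvGet p a))) x = Root p x := by
        intro x hx0 hxn
        by_cases hppaa : pvGet p (pvGet p a) = a
        · omega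
        · exact Root_set_ancestor p n' h a _ ha0 han hb2.1 (by omega) hroot x.toNat x
            le_rfl hx0 hxn
      rw [hunf]
      have := ih (PySem.List.pySetD p a (pvGet p (pvGet p a))) (pvGet p (pvGet p a))
        hinv' hb2.1 (by omega) (by omega)
      refine ⟨?_, this.2.1, ?_⟩
      · rw [this.1, hrs _ hb2.1 (by omega), hroot]
      · intro x hx0 hxn
        rw [this.2.2 x hx0 hxn, hrs x hx0 hxn]

theorem union_spec (n' : Nat) (p : List Int) (a b : Int) (h : pvInv p n')
    (ha0 : 0 ≤ a) (han : a < (n' : Int)) (hb0 : 0 ≤ b) (hbn : b < (n' : Int)) :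
    pvInv (pvUnion p a b) n' ∧
    (∀ x : Int, 0 ≤ x → x < (n' : Int) →
      Root (pvUnion p a b) x =
        if Root p a = Root p b then Root p x
        else if Root p x = max (Root p a) (Root p b) then min (Root p a) (Root p b)
        else Root p x) := by
  have hfa := find_spec n' (a.toNat + 1) p a h ha0 han (by omega)
  have hfb := find_spec n' (b.toNat + 1) (pvFindLoop p a (a.toNat + 1)).1 b hfa.2.1 hb0 hbn
    (by omega)
  have hra := Root_bounds p n' h a ha0 han
  have hrb := Root_bounds p n' h b hb0 hbn
  have hunf : pvUnion p a b =
      (if Root p a ≠ Root p b then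
        PySem.List.pySetD (pvFindLoop (pvFindLoop p a (a.toNat + 1)).1 b (b.toNat + 1)).1
          (max (Root p a) (Root p b)) (min (Root p a) (Root p b))
      else (pvFindLoop (pvFindLoop p a (a.toNat + 1)).1 b (b.toNat + 1)).1) := by
    simp only [pvUnion, pvFind]
    rw [hfa.1, hfb.1, hfa.2.2 b hb0 hbn]
  have hfb1 : ∀ x : Int, 0 ≤ x → x < (n' : Int) →
      Root (pvFindLoop (pvFindLoop p a (a.toNat + 1)).1 b (b.toNat + 1)).1 x = Root p x := by
    intro x hx0 hxn
    rw [hfb.2.2 x hx0 hxn, hfa.2.2 x hx0 hxn]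
  rw [hunf]
  by_cases hne : Root p a = Root p b
  · rw [if_neg (by simp [hne])]
    refine ⟨hfb.2.1, ?_⟩
    intro x hx0 hxn
    rw [if_pos hne]
    exact hfb1 x hx0 hxn
  · rw [if_pos (by simp [hne])]
    have hlo0 : 0 ≤ min (Root p a) (Root p b) := le_min hra.1 hrb.1
    have hlohi : min (Root p a) (Root p b) < max (Root p a) (Root p b) := by
      rcases lt_or_gt_of_ne hne with hlt | hlt <;> simp [min_def, max_def] <;> omega
    have hhin : max (Root p a) (Root p b) < (n' : Int) := by
      simp only [max_def]; split_ifs <;> omega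
    have hfixlo : pvGet (pvFindLoop (pvFindLoop p a (a.toNat + 1)).1 b (b.toNat + 1)).1
        (min (Root p a) (Root p b)) = min (Root p a) (Root p b) := by
      have h2 : Root (pvFindLoop (pvFindLoop p a (a.toNat + 1)).1 b (b.toNat + 1)).1
          (min (Root p a) (Root p b)) = min (Root p a) (Root p b) := by
        rw [hfb1 _ hlo0 (by omega)]
        rcases min_cases (Root p a) (Root p b) with ⟨he, _⟩ | ⟨he, _⟩ <;> rw [he]
        · exact Root_idem p n' h a ha0 han
        · exact Root_idem p n' h b hb0 hbn
      have h1 := Root_bounds _ n' hfb.2.1 (min (Root p a) (Root p b)) hlo0 (by omega)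
      rw [h2] at h1
      exact h1.2.2
    have hfixhi : pvGet (pvFindLoop (pvFindLoop p a (a.toNat + 1)).1 b (b.toNat + 1)).1
        (max (Root p a) (Root p b)) = max (Root p a) (Root p b) := by
      have h2 : Root (pvFindLoop (pvFindLoop p a (a.toNat + 1)).1 b (b.toNat + 1)).1
          (max (Root p a) (Root p b)) = max (Root p a) (Root p b) := by
        rw [hfb1 _ (by omega) hhin]
        rcases max_cases (Root p a) (Root p b) with ⟨he, _⟩ | ⟨he, _⟩ <;> rw [he]
        · exact Root_idem p n' h a ha0 han
        · exact Root_idem p n' h b hb0 hbn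
      have h1 := Root_bounds _ n' hfb.2.1 (max (Root p a) (Root p b)) (by omega) hhin
      rw [h2] at h1
      exact h1.2.2
    refine ⟨pvInv_set _ n' hfb.2.1 _ _ (by omega) hhin hlo0 (by omega), ?_⟩
    intro x hx0 hxn
    rw [Root_set_root _ n' hfb.2.1 _ _ hlo0 hlohi hhin hfixlo hfixhi x.toNat x le_rfl hx0 hxn]
    rw [hfb1 x hx0 hxn, if_neg hne]

theorem relabel_spec (n' : Nat) (lo : Int) :
    ∀ (ms lbl : List Int), lbl.length = n' → (∀ x ∈ ms, 0 ≤ x ∧ x < (n' : Int)) →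
      (pvRelabel lbl ms lo).length = n' ∧
      (∀ a : Int, 0 ≤ a → a < (n' : Int) →
        pvGet (pvRelabel lbl ms lo) a = if a ∈ ms then lo else pvGet lbl a) := by
  intro ms
  induction ms with
  | nil => intro lbl hlen _; exact ⟨hlen, fun a _ _ => by simp [pvRelabel]⟩
  | cons x t ih =>
    intro lbl hlen hmem
    have hx := hmem x (by simp)
    have hxl : x < (lbl.length : Int) := by rw [hlen]; exact hx.2
    have hstep : pvRelabel lbl (x :: t) lo = pvRelabel (PySem.List.pySetD lbl x lo) t lo := rfl
    have hlen' : (PySem.List.pySetD lbl x lo).length = n' := by rw [pvSet_length, hlen]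
    have := ih (PySem.List.pySetD lbl x lo) hlen' (fun y hy => hmem y (by simp [hy]))
    rw [hstep]
    refine ⟨this.1, ?_⟩
    intro a ha0 han
    rw [this.2 a ha0 han]
    by_cases hat : a ∈ t
    · simp [hat]
    · rw [if_neg hat]
      rw [pvGet_set lbl x lo a hx.1 hxl ha0 (by omega)]
      by_cases hax : a = x
      · simp [hax]
      · simp [hax, hat]

def clsL (lbl : List Int) (n' : Nat) (r : Int) : List Int :=
  ((List.range n').filter (fun (i : Nat) => decide (pvGet lbl ((i : Nat) : Int) = r))).map
    (fun (i : Nat) => ((i : Nat) : Int))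

theorem mem_clsL (lbl : List Int) (n' : Nat) (r x : Int) :
    x ∈ clsL lbl n' r ↔ 0 ≤ x ∧ x < (n' : Int) ∧ pvGet lbl x = r := by
  constructor
  · intro hx
    obtain ⟨i, hi, rfl⟩ := List.mem_map.mp hx
    obtain ⟨hir, hget⟩ := List.mem_filter.mp hi
    rw [List.mem_range] at hir
    refine ⟨Int.natCast_nonneg i, by exact_mod_cast hir, by simpa using hget⟩
  · rintro ⟨hx0, hxn, hget⟩
    refine List.mem_map.mpr ⟨x.toNat,
      List.mem_filter.mpr ⟨List.mem_range.mpr (by omega), ?_⟩, by omega⟩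
    simp only [decide_eq_true_eq]
    rw [show ((x.toNat : Nat) : Int) = x by omega]
    exact hget

theorem clsL_eq_nil_iff (lbl : List Int) (n' : Nat) (r : Int) :
    clsL lbl n' r = [] ↔ ∀ x : Int, 0 ≤ x → x < (n' : Int) → pvGet lbl x ≠ r := by
  rw [List.eq_nil_iff_forall_not_mem]
  constructor
  · intro h x hx0 hxn hget
    exact h x ((mem_clsL lbl n' r x).mpr ⟨hx0, hxn, hget⟩)
  · intro h x hx
    obtain ⟨hx0, hxn, hget⟩ := (mem_clsL lbl n' r x).mp hx
    exact h x hx0 hxn hget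

theorem filter_or_perm {α : Type} (p q : α → Bool) :
    ∀ (l : List α), (∀ x ∈ l, ¬(p x = true ∧ q x = true)) →
      (l.filter (fun x => p x || q x)).Perm (l.filter p ++ l.filter q) := by
  intro l
  induction l with
  | nil => intro _; simp
  | cons x t ih =>
    intro hd
    have iht := ih (fun y hy => hd y (by simp [hy]))
    by_cases hp : p x = true
    · have hq : ¬ q x = true := fun hq => hd x (by simp) ⟨hp, hq⟩
      simp only [List.filter_cons, hp, hq, Bool.or_eq_true, if_pos, if_neg]
      simpa [hp, hq] using iht.cons x
    · by_cases hq : q x = true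
      · simp only [List.filter_cons, hp, hq]
        simp only [Bool.false_or, if_pos hq]
        refine (iht.cons x).trans ?_
        simpa using List.perm_middle.symm
      · simp only [List.filter_cons, hp, hq]
        simpa [hp, hq] using iht

theorem find?_filter_ne {ν : Type} (k k' : Int) :
    ∀ l : List (Int × ν),
      List.find? (fun p => p.1 == k') (l.filter (fun q => !(q.1 == k)))
        = if k' = k then none else List.find? (fun p => p.1 == k') l := by
  intro l
  induction l with
  | nil => simp
  | cons p t ih =>
    by_cases hp : p.1 = k
    · rw [List.filter_cons_of_neg (by simp [hp])]
      rw [ih]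
      split_ifs with he
      · rfl
      · rw [List.find?_cons_of_neg (by simp [hp, Ne.symm he])]
    · rw [List.filter_cons_of_pos (by simp [hp])]
      by_cases hp' : p.1 = k'
      · rw [List.find?_cons_of_pos (by simp [hp']), if_neg (by rw [← hp']; exact hp),
          List.find?_cons_of_pos (by simp [hp'])]
      · rw [List.find?_cons_of_neg (by simp [hp']), ih]
        split_ifs with he
        · rfl
        · rw [List.find?_cons_of_neg (by simp [hp'])]

theorem get?_erase {ν : Type} (d : PySem.Dict Int ν) (k k' : Int) :
    (d.erase k).get? k' = if k' = k then none else d.get? k' := by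
  obtain ⟨l⟩ := d
  show Option.map _ (List.find? _ (l.filter _)) = _
  rw [find?_filter_ne k k' l]
  split_ifs <;> rfl

theorem keys_erase_nodup {ν : Type} (d : PySem.Dict Int ν) (k : Int)
    (h : d.keys.Nodup) : (d.erase k).keys.Nodup := by
  obtain ⟨l⟩ := d
  induction l with
  | nil => exact h
  | cons p t ih =>
    simp only [PySem.Dict.keys, PySem.Dict.items, PySem.Dict.erase] at *
    obtain ⟨h1, h2⟩ := List.nodup_cons.mp h
    by_cases hp : p.1 = k
    · rw [List.filter_cons_of_neg (by simp [hp])]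
      exact ih h2
    · rw [List.filter_cons_of_pos (by simp [hp])]
      simp only [List.map_cons]
      refine List.nodup_cons.mpr ⟨?_, ih h2⟩
      intro hmem
      obtain ⟨q, hq, hq2⟩ := List.mem_map.mp hmem
      exact h1 (List.mem_map.mpr ⟨q, List.mem_of_mem_filter hq, hq2⟩)

theorem get?_modify {ν : Type} (d : PySem.Dict Int ν) (k k' : Int) (d0 : ν) (f : ν → ν) :
    (d.modify k d0 f).get? k' = if k' = k then some (f (d.getD k d0)) else d.get? k' := by
  simp only [PySem.Dict.modify, PySem.Dict.get?_insert]

theorem keys_modify_nodup {ν : Type} (d : PySem.Dict Int ν) (k : Int) (d0 : ν) (f : ν → ν)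
    (h : d.keys.Nodup) : (d.modify k d0 f).keys.Nodup := by
  rw [PySem.Dict.keys_modify]
  by_cases hc : d.contains k
  · rw [PySem.Dict.keys_insert_of_contains _ _ hc]; exact h
  · rw [PySem.Dict.keys_insert_of_not_contains _ _ (by simpa using hc)]
    refine List.nodup_append.mpr ⟨h, List.nodup_singleton k, ?_⟩
    intro x hx y hy
    simp only [List.mem_singleton] at hy
    subst hy
    rw [PySem.Dict.contains_iff_mem_keys] at hc
    exact fun he => hc (he ▸ hx)

def MInv (lbl : List Int) (n' : Nat) (members : PySem.Dict Int (List Int)) : Prop :=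
  members.keys.Nodup ∧
  (∀ r : Int, members.get? r = none → clsL lbl n' r = []) ∧
  (∀ (r : Int) (v : List Int), members.get? r = some v → v ≠ [] ∧ v.Perm (clsL lbl n' r))

def JInv (n' : Nat) (p lbl : List Int) (members : PySem.Dict Int (List Int)) : Prop :=
  pvInv p n' ∧ lbl.length = n' ∧
  (∀ a : Int, 0 ≤ a → a < (n' : Int) → Root p a = pvGet lbl a) ∧
  MInv lbl n' members

theorem pvGet_init (n' : Nat) (a : Int) (ha0 : 0 ≤ a) (han : a < (n' : Int)) :
    pvGet ((List.range n').map (fun (i : Nat) => (i : Int))) a = a := by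
  unfold pvGet
  rw [PySem.List.pyGetD_eq_getElem _ _ ha0 (by simpa using han)]
  simp only [List.getElem_map, List.getElem_range]
  omega

theorem init_inv (n' : Nat) : pvInv ((List.range n').map (fun (i : Nat) => (i : Int))) n' := by
  refine ⟨by simp, ?_⟩
  intro a ha0 han
  rw [pvGet_init n' a ha0 han]
  omega

theorem filter_range_single (k : Nat) :
    ∀ n' : Nat, k < n' → (List.range n').filter (fun i => decide (i = k)) = [k] := by
  intro n'
  induction n' with
  | zero => omega
  | succ m ih =>
    intro hk
    rw [List.range_succ, List.filter_append]
    by_cases hkm : k < m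
    · rw [ih hkm]
      have : ¬ m = k := by omega
      simp [this]
    · have hkm' : k = m := by omega
      subst hkm'
      have : (List.range k).filter (fun i => decide (i = k)) = [] := by
        rw [List.filter_eq_nil_iff]
        intro a ha
        rw [List.mem_range] at ha
        simp only [decide_eq_true_eq]
        omega
      simp [this]

theorem clsL_init (n' : Nat) (r : Int) :
    clsL ((List.range n').map (fun (i : Nat) => (i : Int))) n' r
      = if 0 ≤ r ∧ r < (n' : Int) then [r] else [] := by
  split_ifs with hr
  · unfold clsL
    have hpred : ∀ i ∈ List.range n',
        (decide (pvGet ((List.range n').map (fun (i : Nat) => (i : Int))) ((i : Nat) : Int) = r))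
          = (decide (i = r.toNat)) := by
      intro i hi
      rw [List.mem_range] at hi
      rw [pvGet_init n' (i : Int) (by omega) (by omega)]
      simp only [decide_eq_decide]
      omega
    rw [List.filter_congr hpred, filter_range_single r.toNat n' (by omega)]
    simp only [List.map_cons, List.map_nil]
    congr 1
    omega
  · rw [clsL_eq_nil_iff]
    intro x hx0 hxn
    rw [pvGet_init n' x hx0 hxn]
    omega

theorem members0_get? (n' : Nat) (r : Int) :
    ((List.range n').foldl (fun (d : PySem.Dict Int (List Int)) (i : Nat) => d.insert (i : Int) [(i : Int)])
      PySem.Dict.empty).get? r = if 0 ≤ r ∧ r < (n' : Int) then some [r] else none := by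
  induction n' with
  | zero =>
    simp only [List.range_zero, List.foldl_nil]
    rw [PySem.Dict.get?_empty]
    split_ifs with h
    · omega
    · rfl
  | succ m ih =>
    rw [List.range_succ, List.foldl_append, List.foldl_cons, List.foldl_nil]
    rw [PySem.Dict.get?_insert]
    by_cases hr : r = (m : Int)
    · subst hr
      rw [if_pos rfl, if_pos (by omega)]
    · rw [if_neg hr, ih]
      by_cases hc : 0 ≤ r ∧ r < (m : Int)
      · rw [if_pos hc, if_pos (by omega)]
      · rw [if_neg hc, if_neg (by omega)]

theorem members0_nodup (n' : Nat) :
    ((List.range n').foldl (fun (d : PySem.Dict Int (List Int)) (i : Nat) => d.insert (i : Int) [(i : Int)])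
      PySem.Dict.empty).keys.Nodup := by
  exact PySem.Dict.nodup_keys_foldl_insert_key (List.range n') (fun i => (i : Int))
    (fun _ i => [(i : Int)]) PySem.Dict.empty (by rw [PySem.Dict.keys_empty]; exact List.nodup_nil)

theorem JInv_init (n' : Nat) :
    JInv n' ((List.range n').map (fun (i : Nat) => (i : Int))) ((List.range n').map (fun (i : Nat) => (i : Int)))
      ((List.range n').foldl (fun (d : PySem.Dict Int (List Int)) (i : Nat) => d.insert (i : Int) [(i : Int)])
        PySem.Dict.empty) := by
  refine ⟨init_inv n', by simp, ?_, members0_nodup n', ?_, ?_⟩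
  · intro a ha0 han
    rw [pvGet_init n' a ha0 han]
    exact Root_fix _ n' (init_inv n') a ha0 han (pvGet_init n' a ha0 han)
  · intro r hr
    rw [members0_get? n' r] at hr
    rw [clsL_init n' r]
    split_ifs with h
    · rw [if_pos h] at hr; exact absurd hr (by simp)
    · rfl
  · intro r v hv
    rw [members0_get? n' r] at hv
    rw [clsL_init n' r]
    split_ifs at hv with h
    rw [if_pos h]
    cases hv
    exact ⟨by simp, List.Perm.refl _⟩

theorem clsL_eq_of_iff (lbl lbl' : List Int) (n' : Nat) (r r' : Int)
    (h : ∀ a : Int, 0 ≤ a → a < (n' : Int) → (pvGet lbl' a = r ↔ pvGet lbl a = r')) :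
    clsL lbl' n' r = clsL lbl n' r' := by
  unfold clsL
  congr 1
  apply List.filter_congr
  intro i hi
  rw [List.mem_range] at hi
  simp only [decide_eq_decide]
  exact h (i : Int) (by omega) (by omega)

theorem JInv_step (n : Int) (n' : Nat) (hn : n' = n.toNat)
    (p lbl : List Int) (members : PySem.Dict Int (List Int)) (a b : Int)
    (hJ : JInv n' p lbl members) :
    JInv n' (if 0 ≤ a ∧ a < n ∧ 0 ≤ b ∧ b < n then pvUnion p a b else p)
      (if 0 ≤ a ∧ a < n ∧ 0 ≤ b ∧ b < n then
        (if pvGet lbl a ≠ pvGet lbl b then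
          pvRelabel lbl (members.getD (max (pvGet lbl a) (pvGet lbl b)) [])
            (min (pvGet lbl a) (pvGet lbl b))
        else lbl)
      else lbl)
      (if 0 ≤ a ∧ a < n ∧ 0 ≤ b ∧ b < n then
        (if pvGet lbl a ≠ pvGet lbl b then
          ((members.erase (max (pvGet lbl a) (pvGet lbl b))).modify
            (min (pvGet lbl a) (pvGet lbl b)) []
            (fun g => g ++ members.getD (max (pvGet lbl a) (pvGet lbl b)) []))
        else members)
      else members) := by
  obtain ⟨hInv, hlen, hC, hKnd, hMnone, hMsome⟩ := hJ
  by_cases hcond : 0 ≤ a ∧ a < n ∧ 0 ≤ b ∧ b < n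
  swap
  · simp only [if_neg hcond]
    exact ⟨hInv, hlen, hC, hKnd, hMnone, hMsome⟩
  simp only [if_pos hcond]
  have han : a < (n' : Int) := by omega
  have hbn : b < (n' : Int) := by omega
  have ha0 : 0 ≤ a := hcond.1
  have hb0 : 0 ≤ b := hcond.2.2.1
  have hU := union_spec n' p a b hInv ha0 han hb0 hbn
  have hRa : Root p a = pvGet lbl a := hC a ha0 han
  have hRb : Root p b = pvGet lbl b := hC b hb0 hbn
  by_cases hne : pvGet lbl a = pvGet lbl b
  · simp only [hne, ne_eq, not_true_eq_false, if_false]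
    refine ⟨hU.1, hlen, ?_, hKnd, hMnone, hMsome⟩
    intro x hx0 hxn
    rw [hU.2 x hx0 hxn, if_pos (by rw [hRa, hRb, hne]), hC x hx0 hxn]
  · simp only [ne_eq, hne, not_false_eq_true, if_true]
    set la := pvGet lbl a with hla
    set lb := pvGet lbl b with hlb
    set lo := min la lb with hlo
    set hi := max la lb with hhi
    have hbla := Root_bounds p n' hInv a ha0 han
    have hblb := Root_bounds p n' hInv b hb0 hbn
    have hla0 : 0 ≤ la := by rw [← hRa]; exact hbla.1
    have hlan : la < (n' : Int) := by rw [← hRa]; omega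
    have hlb0 : 0 ≤ lb := by rw [← hRb]; exact hblb.1
    have hlbn : lb < (n' : Int) := by rw [← hRb]; omega
    have hlo0 : 0 ≤ lo := le_min hla0 hlb0
    have hlohi : lo < hi := by
      rcases lt_or_gt_of_ne hne with hlt | hlt <;> rw [hlo, hhi] <;>
        simp [min_def, max_def] <;> omega
    have hhin : hi < (n' : Int) := by rw [hhi, max_def]; split_ifs <;> omega
    -- hi has a witness in [0, n'), so it is a key of members
    have hwit : clsL lbl n' hi ≠ [] := by
      rcases max_cases la lb with ⟨he, _⟩ | ⟨he, _⟩ <;> rw [hhi, he] <;>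
        intro hnil <;> rw [clsL_eq_nil_iff] at hnil
      · exact hnil a ha0 han hla.symm
      · exact hnil b hb0 hbn hlb.symm
    obtain ⟨ms, hms⟩ : ∃ ms, members.get? hi = some ms := by
      cases hg : members.get? hi with
      | none => exact absurd (hMnone hi hg) hwit
      | some v => exact ⟨v, rfl⟩
    have hgetD : members.getD hi [] = ms := by
      rw [PySem.Dict.getD_eq_get?_getD, hms]; rfl
    have hmsp := hMsome hi ms hms
    have hmem : ∀ x : Int, x ∈ ms ↔ (0 ≤ x ∧ x < (n' : Int) ∧ pvGet lbl x = hi) := by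
      intro x
      rw [hmsp.2.mem_iff, mem_clsL]
    have hmsb : ∀ x ∈ ms, 0 ≤ x ∧ x < (n' : Int) := by
      intro x hx
      have := (hmem x).mp hx
      exact ⟨this.1, this.2.1⟩
    have hrel := relabel_spec n' lo ms lbl hlen hmsb
    rw [hgetD]
    set lbl' := pvRelabel lbl ms lo with hlbl'
    have hget' : ∀ x : Int, 0 ≤ x → x < (n' : Int) →
        pvGet lbl' x = if pvGet lbl x = hi then lo else pvGet lbl x := by
      intro x hx0 hxn
      rw [hrel.2 x hx0 hxn]
      by_cases hx : x ∈ ms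
      · rw [if_pos hx, if_pos ((hmem x).mp hx).2.2]
      · rw [if_neg hx, if_neg (fun hh => hx ((hmem x).mpr ⟨hx0, hxn, hh⟩))]
    refine ⟨hU.1, hrel.1, ?_, ?_, ?_, ?_⟩
    · -- coupling
      intro x hx0 hxn
      rw [hU.2 x hx0 hxn, if_neg (by rw [hRa, hRb]; exact hne), hget' x hx0 hxn,
        hC x hx0 hxn, hRa, hRb]
    · exact keys_modify_nodup _ _ _ _ (keys_erase_nodup _ _ hKnd)
    · -- none case
      intro r hr
      rw [get?_modify, get?_erase] at hr
      split_ifs at hr with h1 h2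
      · -- r = hi: clsL lbl' hi = []
        subst h2
        rw [clsL_eq_nil_iff]
        intro x hx0 hxn
        rw [hget' x hx0 hxn]
        split_ifs with hcase
        · omega
        · exact hcase
      · -- r ∉ {lo, hi}: unchanged
        have hr' := hMnone r hr
        rw [clsL_eq_of_iff lbl lbl' n' r r (fun x hx0 hxn => by
          rw [hget' x hx0 hxn]
          split_ifs with hcase
          · constructor
            · intro he; omega
            · intro he; rw [he] at hcase; omega
          · exact Iff.rfl)]
        exact hr'
    · -- some case
      intro r v hv
      rw [get?_modify, get?_erase] at hv
      have hperm_lo : clsL lbl' n' lo = clsL lbl' n' lo := rfl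
      split_ifs at hv with h1 h2
      · -- r = lo
        subst h1
        cases hv
        have hclsperm : (clsL lbl' n' lo).Perm (clsL lbl n' lo ++ clsL lbl n' hi) := by
          have hpred : clsL lbl' n' lo
              = ((List.range n').filter (fun (i : Nat) =>
                  (decide (pvGet lbl ((i : Nat) : Int) = lo) ||
                   decide (pvGet lbl ((i : Nat) : Int) = hi)))).map
                (fun (i : Nat) => ((i : Nat) : Int)) := by
            unfold clsL
            congr 1
            apply List.filter_congr
            intro i hi'
            rw [List.mem_range] at hi'
            rw [hget' (i : Int) (by omega) (by omega)]
            by_cases hcase : pvGet lbl (i : Int) = hi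
            · simp [hcase]
            · simp [hcase]
          rw [hpred]
          refine List.Perm.trans (List.Perm.map _ (filter_or_perm _ _ _ ?_)) ?_
          · intro x _ ⟨hp, hq⟩
            simp only [decide_eq_true_eq] at hp hq
            rw [hp] at hq; omega
          · rw [List.map_append]
            exact List.Perm.refl _
        constructor
        · intro hnil
          rw [List.append_eq_nil_iff] at hnil
          exact hmsp.1 hnil.2
        · refine List.Perm.trans ?_ hclsperm.symm
          have hgd : (members.erase hi).getD lo [] = members.getD lo [] := by
            rw [PySem.Dict.getD_eq_get?_getD, PySem.Dict.getD_eq_get?_getD,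
              get?_erase, if_neg (by omega)]
          rw [hgd]
          cases hglo : members.get? lo with
          | none =>
            rw [PySem.Dict.getD_eq_get?_getD, hglo]
            have : clsL lbl n' lo = [] := hMnone lo hglo
            rw [this]
            simp only [Option.getD_none, List.nil_append]
            exact hmsp.2
          | some vlo =>
            rw [PySem.Dict.getD_eq_get?_getD, hglo]
            exact List.Perm.append ((hMsome lo vlo hglo).2) hmsp.2
      · -- other keys (the r = hi branch is closed by split_ifs: none = some is absurd)
        have hv' := hMsome r v hv
        refine ⟨hv'.1, ?_⟩
        rw [clsL_eq_of_iff lbl lbl' n' r r (fun x hx0 hxn => by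
          rw [hget' x hx0 hxn]
          split_ifs with hcase
          · constructor
            · intro he; omega
            · intro he; rw [he] at hcase; omega
          · exact Iff.rfl)]
        exact hv'.2

theorem JInv_fold (n : Int) (n' : Nat) (hn : n' = n.toNat) :
    ∀ (pairs : List (Int × Int)) (p lbl : List Int) (members : PySem.Dict Int (List Int)),
      JInv n' p lbl members →
      JInv n'
        (pairs.foldl
          (fun p ab => if 0 ≤ ab.1 ∧ ab.1 < n ∧ 0 ≤ ab.2 ∧ ab.2 < n then pvUnion p ab.1 ab.2 else p)
          p)
        ((pairs.foldl
          (fun (s : List Int × PySem.Dict Int (List Int)) ab =>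
            if 0 ≤ ab.1 ∧ ab.1 < n ∧ 0 ≤ ab.2 ∧ ab.2 < n then
              let la := pvGet s.1 ab.1
              let lb := pvGet s.1 ab.2
              if la ≠ lb then
                let lo := min la lb
                let hi := max la lb
                let ms := s.2.getD hi []
                (pvRelabel s.1 ms lo, (s.2.erase hi).modify lo [] (fun g => g ++ ms))
              else s
            else s)
          (lbl, members)).1)
        ((pairs.foldl
          (fun (s : List Int × PySem.Dict Int (List Int)) ab =>
            if 0 ≤ ab.1 ∧ ab.1 < n ∧ 0 ≤ ab.2 ∧ ab.2 < n then
              let la := pvGet s.1 ab.1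
              let lb := pvGet s.1 ab.2
              if la ≠ lb then
                let lo := min la lb
                let hi := max la lb
                let ms := s.2.getD hi []
                (pvRelabel s.1 ms lo, (s.2.erase hi).modify lo [] (fun g => g ++ ms))
              else s
            else s)
          (lbl, members)).2) := by
  intro pairs
  induction pairs with
  | nil => intro p lbl members hJ; exact hJ
  | cons ab t ih =>
    intro p lbl members hJ
    simp only [List.foldl_cons]
    have hstep := JInv_step n n' hn p lbl members ab.1 ab.2 hJ
    have hsplit :
        (if 0 ≤ ab.1 ∧ ab.1 < n ∧ 0 ≤ ab.2 ∧ ab.2 < n then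
          let la := pvGet (lbl, members).1 ab.1
          let lb := pvGet (lbl, members).1 ab.2
          if la ≠ lb then
            let lo := min la lb
            let hi := max la lb
            let ms := (lbl, members).2.getD hi []
            (pvRelabel (lbl, members).1 ms lo,
              ((lbl, members).2.erase hi).modify lo [] (fun g => g ++ ms))
          else (lbl, members)
        else (lbl, members))
        = ((if 0 ≤ ab.1 ∧ ab.1 < n ∧ 0 ≤ ab.2 ∧ ab.2 < n then
            (if pvGet lbl ab.1 ≠ pvGet lbl ab.2 then
              pvRelabel lbl (members.getD (max (pvGet lbl ab.1) (pvGet lbl ab.2)) [])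
                (min (pvGet lbl ab.1) (pvGet lbl ab.2))
            else lbl)
          else lbl),
          (if 0 ≤ ab.1 ∧ ab.1 < n ∧ 0 ≤ ab.2 ∧ ab.2 < n then
            (if pvGet lbl ab.1 ≠ pvGet lbl ab.2 then
              ((members.erase (max (pvGet lbl ab.1) (pvGet lbl ab.2))).modify
                (min (pvGet lbl ab.1) (pvGet lbl ab.2)) []
                (fun g => g ++ members.getD (max (pvGet lbl ab.1) (pvGet lbl ab.2)) []))
            else members)
          else members)) := by
      by_cases hcond : 0 ≤ ab.1 ∧ ab.1 < n ∧ 0 ≤ ab.2 ∧ ab.2 < n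
      · by_cases hne : pvGet lbl ab.1 = pvGet lbl ab.2
        · simp [hcond, hne]
        · simp [hcond, hne]
      · simp [hcond]
    rw [hsplit]
    exact ih _ _ _ hstep

theorem extract_snd (n' : Nat) :
    ∀ (xs : List Nat) (p : List Int) (d : PySem.Dict Int (List Int)) (g : Int → Int),
      pvInv p n' → (∀ i ∈ xs, i < n') →
      (∀ x : Int, 0 ≤ x → x < (n' : Int) → Root p x = g x) →
      (xs.foldl
        (fun (s : List Int × PySem.Dict Int (List Int)) (i : Nat) =>
          let fr := pvFind s.1 (i : Int)
          (fr.1, s.2.modify fr.2 [] (fun gg => gg ++ [(i : Int)])))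
        (p, d)).2
      = xs.foldl (fun d (i : Nat) => d.modify (g (i : Int)) [] (fun gg => gg ++ [(i : Int)])) d := by
  intro xs
  induction xs with
  | nil => intro p d g _ _ _; rfl
  | cons i t ih =>
    intro p d g hInv hmem hg
    have hin : i < n' := hmem i (by simp)
    have hfs := find_spec n' ((i : Int).toNat + 1) p (i : Int) hInv (by omega)
      (by exact_mod_cast hin) (by omega)
    simp only [List.foldl_cons]
    have h2 : (pvFind p (i : Int)).2 = g (i : Int) := by
      rw [pvFind, hfs.1, hg (i : Int) (by omega) (by exact_mod_cast hin)]
    rw [h2]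
    exact ih (pvFind p (i : Int)).1 _ g hfs.2.1 (fun j hj => hmem j (by simp [hj]))
      (fun x hx0 hxn => by rw [pvFind, hfs.2.2 x hx0 hxn, hg x hx0 hxn])

theorem groups_eq (n : Int) (pairs : List (Int × Int)) :
    groups_from_pairs_py n pairs = groups_from_pairs_py_alt n pairs := by
  unfold groups_from_pairs_py groups_from_pairs_py_alt
  simp only []
  set n' := n.toNat with hn'
  have hJ := JInv_fold n n' hn' pairs
    ((List.range n').map (fun (i : Nat) => (i : Int)))
    ((List.range n').map (fun (i : Nat) => (i : Int)))
    ((List.range n').foldl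
      (fun (d : PySem.Dict Int (List Int)) (i : Nat) => d.insert (i : Int) [(i : Int)])
      PySem.Dict.empty)
    (JInv_init n')
  obtain ⟨hInvF, hlenF, hCF, hKnd, hMnone, hMsome⟩ := hJ
  set pF := pairs.foldl
    (fun p ab => if 0 ≤ ab.1 ∧ ab.1 < n ∧ 0 ≤ ab.2 ∧ ab.2 < n then pvUnion p ab.1 ab.2 else p)
    ((List.range n').map (fun (i : Nat) => (i : Int))) with hpF
  set stB := pairs.foldl
    (fun (s : List Int × PySem.Dict Int (List Int)) ab =>
      if 0 ≤ ab.1 ∧ ab.1 < n ∧ 0 ≤ ab.2 ∧ ab.2 < n then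
        let la := pvGet s.1 ab.1
        let lb := pvGet s.1 ab.2
        if la ≠ lb then
          let lo := min la lb
          let hi := max la lb
          let ms := s.2.getD hi []
          (pvRelabel s.1 ms lo, (s.2.erase hi).modify lo [] (fun g => g ++ ms))
        else s
      else s)
    (((List.range n').map (fun (i : Nat) => (i : Int))),
      ((List.range n').foldl
        (fun (d : PySem.Dict Int (List Int)) (i : Nat) => d.insert (i : Int) [(i : Int)])
        PySem.Dict.empty)) with hstB
  -- the A-side dict
  have hsnd := extract_snd n' (List.range n') pF PySem.Dict.empty
    (fun x => pvGet stB.1 x) hInvF (fun i hi => List.mem_range.mp hi)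
    (fun x hx0 hxn => hCF x hx0 hxn)
  rw [hsnd]
  set dA := (List.range n').foldl
    (fun (d : PySem.Dict Int (List Int)) (i : Nat) =>
      d.modify (pvGet stB.1 (i : Int)) [] (fun gg => gg ++ [(i : Int)])) PySem.Dict.empty with hdA
  have hAgetD : ∀ r : Int, dA.getD r [] = clsL stB.1 n' r := by
    intro r
    have hmapfold : dA = (((List.range n').map
        (fun (i : Nat) => (pvGet stB.1 (i : Int), (i : Int)))).foldl
        (fun d p => d.modify p.1 [] (fun gg => gg ++ [p.2])) PySem.Dict.empty) := by
      rw [List.foldl_map]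
    rw [hmapfold, PySem.Dict.getD_foldl_modify_append, PySem.Dict.getD_empty, List.nil_append,
        List.filter_map, List.map_map]
    unfold clsL
    have hfil : (List.range n').filter
        ((fun (p : Int × Int) => p.1 == r) ∘ (fun (i : Nat) => (pvGet stB.1 (i : Int), (i : Int))))
        = (List.range n').filter (fun (i : Nat) => decide (pvGet stB.1 ((i : Nat) : Int) = r)) := by
      apply List.filter_congr
      intro i _
      by_cases h : pvGet stB.1 (i : Int) = r <;> simp [h]
    rw [hfil]
    rfl
  have hAkeys : dA.keys
      = PySem.Set.ofList ((List.range n').map (fun (i : Nat) => pvGet stB.1 (i : Int))) := by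
    have h2 : dA.keys = PySem.Set.update PySem.Dict.empty.keys
        ((List.range n').map (fun (i : Nat) => pvGet stB.1 (i : Int))) :=
      PySem.Dict.keys_foldl_modify_key (List.range n') (fun (i : Nat) => pvGet stB.1 (i : Int))
        ([] : List Int) (fun _ (i : Nat) => fun gg => gg ++ [(i : Int)]) PySem.Dict.empty
    rw [h2, PySem.Dict.keys_empty]
    rfl
  have hAnodup : dA.keys.Nodup := by rw [hAkeys]; exact PySem.Set.nodup_ofList _
  have hmemA : ∀ r : Int, r ∈ dA.keys ↔ clsL stB.1 n' r ≠ [] := by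
    intro r
    rw [hAkeys, PySem.Set.mem_ofList, List.mem_map]
    constructor
    · rintro ⟨i, hi, rfl⟩ hnil
      rw [clsL_eq_nil_iff] at hnil
      have hi' := List.mem_range.mp hi
      exact hnil (i : Int) (by omega) (by exact_mod_cast hi') rfl
    · intro hne
      obtain ⟨x, hx⟩ := List.exists_mem_of_ne_nil _ hne
      obtain ⟨hx0, hxn, hg⟩ := (mem_clsL _ _ _ _).mp hx
      exact ⟨x.toNat, List.mem_range.mpr (by omega),
        by rw [show ((x.toNat : Nat) : Int) = x by omega]; exact hg⟩
  have hmemB : ∀ r : Int, r ∈ stB.2.keys ↔ clsL stB.1 n' r ≠ [] := by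
    intro r
    constructor
    · intro hr hnil
      cases hg : stB.2.get? r with
      | none => exact (PySem.Dict.get?_eq_none_iff_not_mem_keys _ _).mp hg hr
      | some v =>
        have hv := hMsome r v hg
        exact hv.1 (List.Perm.eq_nil (hnil ▸ hv.2))
    · intro hne
      by_cases hr : r ∈ stB.2.keys
      · exact hr
      · exact absurd (hMnone r ((PySem.Dict.get?_eq_none_iff_not_mem_keys _ _).mpr hr)) hne
  have hperm : dA.keys.Perm stB.2.keys :=
    (List.perm_ext_iff_of_nodup hAnodup hKnd).mpr
      (fun r => (hmemA r).trans (hmemB r).symm)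
  have hsorted : PySem.List.sorted dA.keys (fun r => r) false
      = PySem.List.sorted stB.2.keys (fun r => r) false :=
    PySem.List.sorted_eq_sorted_of_perm _ _ _ (fun _ _ h => h) hperm
  rw [hsorted]
  apply List.map_congr_left
  intro r hr
  have hrB : r ∈ stB.2.keys := (PySem.List.mem_sorted _ _ _ _).mp hr
  cases hg : stB.2.get? r with
  | none => exact absurd hrB ((PySem.Dict.get?_eq_none_iff_not_mem_keys _ _).mp hg)
  | some v =>
    have hv := hMsome r v hg
    rw [hAgetD r, PySem.Dict.getD_eq_get?_getD, hg]
    exact PySem.List.sorted_eq_sorted_of_perm _ _ _ (fun _ _ h => h) hv.2.symm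

-- ===== VERDICT (by name: the statement is the Claim_ definition above) =====
theorem groups_from_pairs_py_spec : Claim_equal_groups_from_pairs_py := by
  intro n pairs _
  unfold Spec_groups_from_pairs_py
  exact groups_eq n pairs
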